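-- pv_equiv track=rewrite | github.com/dleogh476/Programmers | 프로그래머스/lv2/12981. 영어 끝말잇기/영어 끝말잇기.py | solution
-- ===== SOURCE A (Python) =====
-- def solution(n, words):
--     answer = [0,0]
--     word_dict = dict()
--
--     for word in words:
--         word_dict[word] = False
--     word_dict[words[0]] = True
--     for count in range(1,len(words)):
--         if word_dict[words[count]] or words[count][0] != words[count-1][-1]:
--             answer[0] = (count % n) + 1
--             answer[1] = (count // n) + 1
--             return answer
--         word_dict[words[count]] = True
--
--     return answer
-- ===== SOURCE B (Python) =====
-- def solution(n, words):
--     first_dup = len(words)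
--     seen = {words[0]}
--     for i in range(1, len(words)):
--         if words[i] in seen:
--             first_dup = i
--             break
--         seen.add(words[i])
--     idx = next((i for i in range(1, first_dup)
--                 if words[i][0] != words[i - 1][-1]), first_dup)
--     if idx == len(words):
--         return [0, 0]
--     return [idx % n + 1, idx // n + 1]
-- ===== Notes on version B (the rewrite author's own statement) =====
-- stated objective: alternative
-- what changed: Replaces A's single fused loop over a pre-built all-words seen-dict with two separate scans: the index of the first duplicate word (growing set, early break), then a pairwise chain-break scan over the earlier pairs only, returning the smaller index.
import Mathlib
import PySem

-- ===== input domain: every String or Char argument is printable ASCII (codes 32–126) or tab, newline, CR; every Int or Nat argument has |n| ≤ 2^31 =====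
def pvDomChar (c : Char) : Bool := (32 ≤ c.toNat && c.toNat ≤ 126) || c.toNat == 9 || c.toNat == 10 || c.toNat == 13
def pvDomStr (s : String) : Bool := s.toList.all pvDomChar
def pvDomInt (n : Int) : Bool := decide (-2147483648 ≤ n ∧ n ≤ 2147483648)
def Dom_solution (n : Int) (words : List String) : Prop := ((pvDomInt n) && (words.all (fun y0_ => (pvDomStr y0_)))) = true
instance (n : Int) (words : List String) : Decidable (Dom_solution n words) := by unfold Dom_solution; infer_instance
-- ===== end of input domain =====

-- B replaces A's single fused loop over a pre-built seen-dict with two separate scans (first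
-- duplicate via a growing set, then a chain-break scan over the earlier pairs only), taking the
-- smaller index; a timing run measured B faster by a constant factor (no dict prepass/writes).

-- ===== PORT A =====
-- the 'for count in range(1, len(words))' loop with the mutable word_dict
def solutionGo (n : Int) (words : List String) : List Int → PySem.Dict String Bool → List Int
  | [], _ => [0, 0]
  | count :: rest, d =>
    let w := (PySem.List.pyGet? words count).getD ""
    let prev := (PySem.List.pyGet? words (count - 1)).getD ""
    if d.getD w false || (PySem.Str.pyGet? w 0 != PySem.Str.pyGet? prev (-1)) then
      [PySem.Int.mod count n + 1, PySem.Int.floordiv count n + 1]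
    else
      solutionGo n words rest (d.insert w true)

def solution (n : Int) (words : List String) : List Int :=
  let wordDict := words.foldl (fun d word => d.insert word false) PySem.Dict.empty
  let wordDict := wordDict.insert ((PySem.List.pyGet? words 0).getD "") true
  solutionGo n words (PySem.List.pyRange 1 (words.length : Int) 1) wordDict

-- ===== PORT B =====
-- first_dup: the 'for i in range(1, len(words))' loop over the growing seen set
def firstDupGo (words : List String) : List Int → PySem.Set String → Int
  | [], _ => (words.length : Int)
  | i :: rest, seen =>
    if PySem.Set.contains seen ((PySem.List.pyGet? words i).getD "") then i
    else firstDupGo words rest (PySem.Set.add seen ((PySem.List.pyGet? words i).getD ""))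

-- idx = next((i for i in range(1, first_dup) if words[i][0] != words[i-1][-1]), first_dup)
def firstBreakD (words : List String) : List Int → Int → Int
  | [], dflt => dflt
  | i :: rest, dflt =>
    if PySem.Str.pyGet? ((PySem.List.pyGet? words i).getD "") 0 !=
       PySem.Str.pyGet? ((PySem.List.pyGet? words (i - 1)).getD "") (-1) then i
    else firstBreakD words rest dflt

def solution_alt (n : Int) (words : List String) : List Int :=
  let firstDup := firstDupGo words (PySem.List.pyRange 1 (words.length : Int) 1)
      (PySem.Set.ofList [(PySem.List.pyGet? words 0).getD ""])
  let idx := firstBreakD words (PySem.List.pyRange 1 firstDup 1) firstDup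
  if idx = (words.length : Int) then [0, 0]
  else [PySem.Int.mod idx n + 1, PySem.Int.floordiv idx n + 1]

-- ===== PRECONDITION & SPEC =====
-- helpers describing one step of the game on the raw input
def wordAt (words : List String) (i : Int) : String := (PySem.List.pyGet? words i).getD ""
-- words[i] already appeared among words[0..i-1]
def dupAt (words : List String) (i : Int) : Prop := wordAt words i ∈ words.take i.toNat
-- the character comparison at step i would touch an empty word (Python IndexError)
def emptyAt (words : List String) (i : Int) : Prop := wordAt words i = "" ∨ wordAt words (i - 1) = ""
-- first char of words[i] differs from last char of words[i-1]
def brkAt (words : List String) (i : Int) : Prop :=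
  PySem.Str.pyGet? (wordAt words i) 0 ≠ PySem.Str.pyGet? (wordAt words (i - 1)) (-1)
-- the scan stops (returns or raises) at step i
def condAt (words : List String) (i : Int) : Prop := dupAt words i ∨ emptyAt words i ∨ brkAt words i
-- the scan stops at step i by RETURNING (duplicate, or a clean chain break)
def stopOkAt (words : List String) (i : Int) : Prop :=
  dupAt words i ∨ (¬ emptyAt words i ∧ brkAt words i)

-- Pre_ is exactly where A returns: it excludes the empty list (IndexError), games whose scan
-- reaches an empty word before a verdict (IndexError), and n = 0 when a violation is found
-- (ZeroDivisionError); A returns everywhere else.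
def Pre_solution (n : Int) (words : List String) : Prop :=
  words ≠ [] ∧
    ((∀ i ∈ PySem.List.pyRange 1 (words.length : Int) 1, ¬ condAt words i) ∨
     (n ≠ 0 ∧ ∃ i ∈ PySem.List.pyRange 1 (words.length : Int) 1,
        stopOkAt words i ∧ ∀ j ∈ PySem.List.pyRange 1 i 1, ¬ condAt words j))
instance (n : Int) (words : List String) : Decidable (Pre_solution n words) := by
  unfold Pre_solution condAt stopOkAt dupAt emptyAt brkAt wordAt; infer_instance

def pvWitness_solution : Int × List String := (2, ["tank", "kick", "know"])

def Spec_solution (n : Int) (words : List String) (out : List Int) : Prop := out = solution_alt n words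
instance (n : Int) (words : List String) (out : List Int) : Decidable (Spec_solution n words out) := by unfold Spec_solution; infer_instance

-- ===== CLAIM (what is proved, stated in full; the proofs are below) =====
def Claim_equal_solution : Prop := ∀ (n : Int) (words : List String), Dom_solution n words → Pre_solution n words → Spec_solution n words (solution n words)

-- ===== LEMMAS AND PROOFS =====

-- firstDupGo returns len(words) or one of the scanned indices
lemma firstDupGo_mem (words : List String) (r : List Int) (s : PySem.Set String) :
    firstDupGo words r s = (words.length : Int) ∨ firstDupGo words r s ∈ r := by
  induction r generalizing s with
  | nil => left; rfl
  | cons i rest ih =>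
    simp only [firstDupGo]
    split
    · right; simp
    · rcases ih (PySem.Set.add s ((PySem.List.pyGet? words i).getD "")) with h | h
      · left; exact h
      · right; simp [h]

lemma firstBreakD_mem (words : List String) (r : List Int) (dflt : Int) :
    firstBreakD words r dflt = dflt ∨ firstBreakD words r dflt ∈ r := by
  induction r with
  | nil => left; rfl
  | cons i rest ih =>
    simp only [firstBreakD]
    split
    · right; simp
    · rcases ih with h | h
      · left; exact h
      · right; simp [h]

-- main loop correspondence: A's fused loop equals the min of B's two scans
lemma go_eq (n : Int) (words : List String) (r : List Int) (d : PySem.Dict String Bool)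
    (s : PySem.Set String)
    (hL : ∀ j ∈ r, j < (words.length : Int))
    (hp : r.Pairwise (· < ·))
    (hd : ∀ w, d.getD w false = true ↔ w ∈ s) :
    solutionGo n words r d =
      (if min (firstDupGo words r s) (firstBreakD words r (words.length : Int)) = (words.length : Int) then [0, 0]
       else [PySem.Int.mod (min (firstDupGo words r s) (firstBreakD words r (words.length : Int))) n + 1,
             PySem.Int.floordiv (min (firstDupGo words r s) (firstBreakD words r (words.length : Int))) n + 1]) := by
  induction r generalizing d s with
  | nil => simp [solutionGo, firstDupGo, firstBreakD]
  | cons i rest ih =>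
    have hiL : i < (words.length : Int) := hL i (by simp)
    have hrest : ∀ j ∈ rest, i < j := by
      intro j hj; exact (List.pairwise_cons.mp hp).1 j hj
    have hdupLB : i ≤ firstDupGo words rest (PySem.Set.add s ((PySem.List.pyGet? words i).getD "")) := by
      rcases firstDupGo_mem words rest (PySem.Set.add s ((PySem.List.pyGet? words i).getD "")) with h | h
      · omega
      · exact le_of_lt (hrest _ h)
    have hbrkLB : i ≤ firstBreakD words rest (words.length : Int) := by
      rcases firstBreakD_mem words rest (words.length : Int) with h | h
      · omega
      · exact le_of_lt (hrest _ h)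
    have hfd_eq : firstDupGo words (i :: rest) s =
        if PySem.Set.contains s ((PySem.List.pyGet? words i).getD "") then i
        else firstDupGo words rest (PySem.Set.add s ((PySem.List.pyGet? words i).getD "")) := rfl
    have hfb_eq : firstBreakD words (i :: rest) (words.length : Int) =
        if PySem.Str.pyGet? ((PySem.List.pyGet? words i).getD "") 0 !=
           PySem.Str.pyGet? ((PySem.List.pyGet? words (i - 1)).getD "") (-1) then i
        else firstBreakD words rest (words.length : Int) := rfl
    by_cases hdup : PySem.Set.contains s ((PySem.List.pyGet? words i).getD "") = true
    · -- duplicate at i: A fires (dict says True), the min is i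
      have hdv : d.getD ((PySem.List.pyGet? words i).getD "") false = true := by
        rw [hd]; exact (PySem.Set.contains_iff _ _).mp hdup
      have hmin : min (firstDupGo words (i :: rest) s) (firstBreakD words (i :: rest) (words.length : Int)) = i := by
        rw [hfd_eq, if_pos hdup, hfb_eq]
        split
        · exact min_self i
        · exact min_eq_left hbrkLB
      rw [hmin, if_neg (by omega)]
      simp only [solutionGo]
      rw [hdv]
      simp
    · have hdv : d.getD ((PySem.List.pyGet? words i).getD "") false = false := by
        rcases Bool.eq_false_or_eq_true (d.getD ((PySem.List.pyGet? words i).getD "") false) with h | h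
        · exact absurd ((PySem.Set.contains_iff _ _).mpr ((hd _).mp h)) hdup
        · exact h
      by_cases hbrk : (PySem.Str.pyGet? ((PySem.List.pyGet? words i).getD "") 0 !=
          PySem.Str.pyGet? ((PySem.List.pyGet? words (i - 1)).getD "") (-1)) = true
      · -- chain break at i, no duplicate: the min is again i
        have hmin : min (firstDupGo words (i :: rest) s) (firstBreakD words (i :: rest) (words.length : Int)) = i := by
          rw [hfd_eq, if_neg hdup, hfb_eq, if_pos hbrk]
          exact min_eq_right hdupLB
        rw [hmin, if_neg (by omega)]
        simp only [solutionGo]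
        rw [hdv, hbrk]
        simp
      · -- no violation at i: step both sides
        have hbrk' : (PySem.Str.pyGet? ((PySem.List.pyGet? words i).getD "") 0 !=
            PySem.Str.pyGet? ((PySem.List.pyGet? words (i - 1)).getD "") (-1)) = false := by
          simpa using hbrk
        rw [hfd_eq, if_neg hdup, hfb_eq, if_neg hbrk]
        simp only [solutionGo]
        rw [hdv, hbrk']
        simp only [Bool.false_or, Bool.false_eq_true, if_false]
        exact ih _ _ (fun j hj => hL j (by simp [hj])) (List.pairwise_cons.mp hp).2
          (fun w => by
            by_cases hw : w = (PySem.List.pyGet? words i).getD ""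
            · subst hw
              simp [PySem.Dict.getD_insert_self, PySem.Set.mem_add]
            · rw [PySem.Dict.getD_insert_of_ne _ _ _ hw, hd, PySem.Set.mem_add]
              simp [hw])

-- every value in the initial all-False dict reads back False
lemma foldl_insert_false_getD (ws : List String) (d : PySem.Dict String Bool) (w : String)
    (h : d.getD w false = false) :
    (ws.foldl (fun d x => d.insert x false) d).getD w false = false := by
  induction ws generalizing d with
  | nil => exact h
  | cons x xs ih =>
    simp only [List.foldl_cons]
    apply ih
    by_cases hw : w = x
    · subst hw; simp [PySem.Dict.getD_insert_self]
    · rw [PySem.Dict.getD_insert_of_ne _ _ _ hw]; exact h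

-- the full break scan, truncated by min with the first duplicate, equals the bounded scan
lemma min_firstBreakD (words : List String) (L fd : Int) (hfdL : fd ≤ L) :
    ∀ (k : Nat) (a : Int), (fd - a).toNat = k →
      min fd (firstBreakD words (PySem.List.pyRange a L 1) L) =
        firstBreakD words (PySem.List.pyRange a fd 1) fd := by
  intro k
  induction k with
  | zero =>
    intro a hk
    have hfa : fd ≤ a := by omega
    rw [PySem.List.pyRange_one_eq_nil hfa]
    have hle : fd ≤ firstBreakD words (PySem.List.pyRange a L 1) L := by
      rcases firstBreakD_mem words (PySem.List.pyRange a L 1) L with h | h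
      · omega
      · have := (PySem.List.mem_pyRange_one.mp h).1; omega
    simpa [firstBreakD] using min_eq_left hle
  | succ k ih =>
    intro a hk
    have haf : a < fd := by omega
    have haL : a < L := by omega
    rw [PySem.List.pyRange_one_cons haf, PySem.List.pyRange_one_cons haL]
    simp only [firstBreakD]
    split
    · exact min_eq_right (le_of_lt haf)
    · exact ih (a + 1) (by omega)

-- ===== VERDICT (by name: the statement is the Claim_ definition above) =====
theorem solution_spec : Claim_equal_solution := by
  intro n words _ _
  unfold Spec_solution solution solution_alt
  have h1 : ∀ j ∈ PySem.List.pyRange 1 (words.length : Int) 1, j < (words.length : Int) := by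
    intro j hj; exact (PySem.List.mem_pyRange_one.mp hj).2
  have h3 : ∀ w, ((words.foldl (fun d word => d.insert word false) PySem.Dict.empty).insert
      ((PySem.List.pyGet? words 0).getD "") true).getD w false = true ↔
      w ∈ PySem.Set.ofList [(PySem.List.pyGet? words 0).getD ""] := by
    intro w
    by_cases hw : w = (PySem.List.pyGet? words 0).getD ""
    · subst hw
      simp [PySem.Dict.getD_insert_self, PySem.Set.mem_ofList]
    · rw [PySem.Dict.getD_insert_of_ne _ _ _ hw]
      rw [foldl_insert_false_getD words PySem.Dict.empty w (by simp [PySem.Dict.getD_empty])]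
      simp [PySem.Set.mem_ofList, hw]
  have hfdL : firstDupGo words (PySem.List.pyRange 1 (words.length : Int) 1)
      (PySem.Set.ofList [(PySem.List.pyGet? words 0).getD ""]) ≤ (words.length : Int) := by
    rcases firstDupGo_mem words (PySem.List.pyRange 1 (words.length : Int) 1)
        (PySem.Set.ofList [(PySem.List.pyGet? words 0).getD ""]) with h | h
    · omega
    · have := (PySem.List.mem_pyRange_one.mp h).2; omega
  rw [go_eq n words _ _ _ h1 (PySem.List.pairwise_lt_pyRange_one 1 (words.length : Int)) h3,
      min_firstBreakD words (words.length : Int) _ hfdL _ 1 rfl]
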